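-- pv_equiv track=rewrite | github.com/TravisHarrisDevelopment/AoC2023 | day2.py | get_min_power
-- ===== SOURCE A (Python) =====
-- def get_min_power(draws:[]):
--     red, green, blue = 0, 0, 0
--     for d in draws:
--         if d[0] > red:
--             red = d[0]
--         if d[1] > green:
--             green = d[1]
--         if d[2] > blue:
--             blue = d[2]
--
--     return red*green*blue
-- ===== SOURCE B (Python) =====
-- def _maxima(draws):
--     if not draws:
--         return (0, 0, 0)
--     if len(draws) == 1:
--         d = draws[0]
--         return (max(d[0], 0), max(d[1], 0), max(d[2], 0))
--     mid = len(draws) // 2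
--     r1, g1, b1 = _maxima(draws[:mid])
--     r2, g2, b2 = _maxima(draws[mid:])
--     return (max(r1, r2), max(g1, g2), max(b1, b2))
--
--
-- def get_min_power(draws: []):
--     r, g, b = _maxima(draws)
--     return r * g * b
-- ===== Notes on version B (the rewrite author's own statement) =====
-- stated objective: alternative
-- what changed: Replaces the single left-to-right loop with three compare-and-update branches by a divide-and-conquer recursion that splits the list in halves, clamps each draw to 0 at the leaves, and combines halves component-wise with max; correct because max is associative and commutative with the 0-clamp as the empty case.
import Mathlib
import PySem

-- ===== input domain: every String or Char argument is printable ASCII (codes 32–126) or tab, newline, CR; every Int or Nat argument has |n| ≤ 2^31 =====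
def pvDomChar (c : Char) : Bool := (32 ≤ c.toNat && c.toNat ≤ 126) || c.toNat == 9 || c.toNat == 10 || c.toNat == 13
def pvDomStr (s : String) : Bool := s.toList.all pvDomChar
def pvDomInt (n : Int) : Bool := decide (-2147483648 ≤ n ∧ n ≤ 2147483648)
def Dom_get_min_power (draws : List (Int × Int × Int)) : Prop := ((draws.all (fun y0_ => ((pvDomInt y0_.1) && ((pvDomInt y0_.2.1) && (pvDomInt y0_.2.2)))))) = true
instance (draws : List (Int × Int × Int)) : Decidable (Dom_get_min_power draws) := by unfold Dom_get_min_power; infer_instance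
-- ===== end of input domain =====

-- B replaces A's single left-to-right loop (three compare-and-update branches) by a
-- divide-and-conquer recursion: split the list in halves, clamp each draw to 0 at the
-- leaves, combine halves component-wise with max. Same values, different traversal.

-- ===== PORT A =====
def get_min_power (draws : List (Int × Int × Int)) : Int :=
  let s := draws.foldl
    (fun (s : Int × Int × Int) d =>
      (if d.1 > s.1 then d.1 else s.1,
       if d.2.1 > s.2.1 then d.2.1 else s.2.1,
       if d.2.2 > s.2.2 then d.2.2 else s.2.2))
    (0, 0, 0)
  s.1 * s.2.1 * s.2.2

-- ===== PORT B =====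
-- Python's draws[:mid] / draws[mid:] (0 ≤ mid ≤ len) are List.take / List.drop.
def pvCombine (p q : Int × Int × Int) : Int × Int × Int :=
  (max p.1 q.1, max p.2.1 q.2.1, max p.2.2 q.2.2)

def pvMaxima : List (Int × Int × Int) → Int × Int × Int
  | [] => (0, 0, 0)
  | [d] => (max d.1 0, max d.2.1 0, max d.2.2 0)
  | a :: b :: t =>
      pvCombine (pvMaxima ((a :: b :: t).take ((a :: b :: t).length / 2)))
                (pvMaxima ((a :: b :: t).drop ((a :: b :: t).length / 2)))
termination_by l => l.length
decreasing_by
  · simp [List.length_take]; omega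
  · simp [List.length_drop]; omega

def get_min_power_alt (draws : List (Int × Int × Int)) : Int :=
  let m := pvMaxima draws
  m.1 * m.2.1 * m.2.2

-- ===== PRECONDITION & SPEC =====
def Spec_get_min_power (draws : List (Int × Int × Int)) (out : Int) : Prop := out = get_min_power_alt draws
instance (draws : List (Int × Int × Int)) (out : Int) : Decidable (Spec_get_min_power draws out) := by unfold Spec_get_min_power; infer_instance

-- ===== CLAIM (what is proved, stated in full; the proofs are below) =====
def Claim_equal_get_min_power : Prop := ∀ (draws : List (Int × Int × Int)), Dom_get_min_power draws → Spec_get_min_power draws (get_min_power draws)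

-- ===== LEMMAS AND PROOFS =====

theorem pv_fold_split (draws : List (Int × Int × Int)) (r g b : Int) :
    draws.foldl
      (fun (s : Int × Int × Int) d =>
        (if d.1 > s.1 then d.1 else s.1,
         if d.2.1 > s.2.1 then d.2.1 else s.2.1,
         if d.2.2 > s.2.2 then d.2.2 else s.2.2))
      (r, g, b)
    = ((draws.map (fun d => d.1)).foldl max r,
       (draws.map (fun d => d.2.1)).foldl max g,
       (draws.map (fun d => d.2.2)).foldl max b) := by
  induction draws generalizing r g b with
  | nil => simp
  | cons d t ih =>
    have hstep : ∀ x y : Int, (if y > x then y else x) = max x y := by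
      intro x y; omega
    simp only [List.foldl_cons, List.map_cons]
    rw [ih]
    simp only [hstep]

theorem pv_le_foldl_max (l : List Int) (a : Int) : a ≤ l.foldl max a := by
  induction l generalizing a with
  | nil => simp
  | cons x t ih =>
    simp only [List.foldl_cons]
    exact le_trans (le_max_left a x) (ih (max a x))

theorem pv_foldl_max_init (l : List Int) (a : Int) (ha : 0 ≤ a) :
    l.foldl max a = max a (l.foldl max 0) := by
  induction l generalizing a with
  | nil => simp [max_eq_left ha]
  | cons x t ih =>
    simp only [List.foldl_cons]
    rw [ih (max a x) (le_trans ha (le_max_left a x)), ih (max 0 x) (le_max_left 0 x)]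
    have h0 : (0:Int) ≤ t.foldl max 0 := pv_le_foldl_max t 0
    omega

theorem pv_maxima_eq (l : List (Int × Int × Int)) :
    pvMaxima l = ((l.map (fun d => d.1)).foldl max 0,
                  (l.map (fun d => d.2.1)).foldl max 0,
                  (l.map (fun d => d.2.2)).foldl max 0) := by
  induction l using pvMaxima.induct with
  | case1 => simp [pvMaxima]
  | case2 d => simp [pvMaxima]; omega
  | case3 a b t ih1 ih2 =>
    rw [pvMaxima, pvCombine]
    simp only [ih1, ih2]
    have hsplit : ∀ (f : (Int × Int × Int) → Int),
        ((a :: b :: t).map f).foldl max 0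
          = max ((((a :: b :: t).take ((a :: b :: t).length / 2)).map f).foldl max 0)
                ((((a :: b :: t).drop ((a :: b :: t).length / 2)).map f).foldl max 0) := by
      intro f
      conv_lhs => rw [← List.take_append_drop ((a :: b :: t).length / 2) (a :: b :: t)]
      rw [List.map_append, List.foldl_append,
        pv_foldl_max_init _ _ (pv_le_foldl_max _ 0)]
    simp only [hsplit]

-- ===== VERDICT (by name: the statement is the Claim_ definition above) =====
theorem get_min_power_spec : Claim_equal_get_min_power := by
  intro draws _
  unfold Spec_get_min_power get_min_power get_min_power_alt
  rw [pv_fold_split, pv_maxima_eq]
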